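-- pv_equiv track=rewrite | github.com/AhmarZaidi/Drive-ZipSkipper | Utility_Functions.py | sortFolderFiles
-- ===== SOURCE A (Python) =====
-- def sortFolderFiles(itemsList):
--     l1 = []
--     l2 = []
--     for x in itemsList:
--         if x['mimeType'] == 'application/vnd.google-apps.folder':
--             l1.append(x)
--         else:
--             l2.append(x)
--     return l1+l2
-- ===== SOURCE B (Python) =====
-- def sortFolderFiles(itemsList):
--     return sorted(itemsList, key=lambda x: x['mimeType'] != 'application/vnd.google-apps.folder')
-- ===== Notes on version B (the rewrite author's own statement) =====
-- stated objective: idiomatic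
-- what changed: Replaces the two-bucket partition loop with a single stable sort keyed on the boolean 'is not a folder', relying on sort stability to preserve the original order within each group.
import Mathlib
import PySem

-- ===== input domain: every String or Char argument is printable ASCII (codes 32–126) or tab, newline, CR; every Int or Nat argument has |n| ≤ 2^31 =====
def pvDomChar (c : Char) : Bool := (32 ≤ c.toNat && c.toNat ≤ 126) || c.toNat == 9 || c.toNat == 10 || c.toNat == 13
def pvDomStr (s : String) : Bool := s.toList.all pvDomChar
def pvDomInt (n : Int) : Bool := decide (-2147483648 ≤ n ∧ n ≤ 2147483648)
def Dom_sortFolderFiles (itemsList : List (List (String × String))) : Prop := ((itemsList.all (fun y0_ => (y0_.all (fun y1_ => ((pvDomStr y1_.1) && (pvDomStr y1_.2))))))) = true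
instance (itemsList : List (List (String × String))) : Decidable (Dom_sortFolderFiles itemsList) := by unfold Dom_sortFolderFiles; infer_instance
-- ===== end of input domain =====

-- B replaces A's two-bucket partition loop with one stable sort on the boolean key "is not a folder" (idiomatic, not faster).

-- ===== PORT A =====
-- x['mimeType'] : lookup in the dict x; Pre_ guarantees the key is present, so getD's default is never read.
def pvMime (x : List (String × String)) : String :=
  (PySem.Dict.ofList x).getD "mimeType" ""

def sortFolderFiles (itemsList : List (List (String × String))) : List (List (String × String)) :=
  let p := itemsList.foldl
    (fun (acc : List (List (String × String)) × List (List (String × String))) x =>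
      if pvMime x == "application/vnd.google-apps.folder" then (acc.1 ++ [x], acc.2)
      else (acc.1, acc.2 ++ [x]))
    ([], [])
  p.1 ++ p.2

-- ===== PORT B =====
def sortFolderFiles_alt (itemsList : List (List (String × String))) : List (List (String × String)) :=
  PySem.List.sorted itemsList (fun x => pvMime x != "application/vnd.google-apps.folder") false

-- ===== PRECONDITION & SPEC =====
-- Pre_ excludes exactly the inputs where some item lacks a 'mimeType' key: there A (and B's key function) raises KeyError.
def Pre_sortFolderFiles (itemsList : List (List (String × String))) : Prop :=
  ∀ x ∈ itemsList, ((PySem.Dict.ofList x).get? "mimeType").isSome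
instance (itemsList : List (List (String × String))) : Decidable (Pre_sortFolderFiles itemsList) := by unfold Pre_sortFolderFiles; infer_instance

def pvWitness_sortFolderFiles : (List (List (String × String))) :=
  [[("mimeType", "text/plain")], [("mimeType", "application/vnd.google-apps.folder")]]

def Spec_sortFolderFiles (itemsList : List (List (String × String))) (out : List (List (String × String))) : Prop := out = sortFolderFiles_alt itemsList
instance (itemsList : List (List (String × String))) (out : List (List (String × String))) : Decidable (Spec_sortFolderFiles itemsList out) := by unfold Spec_sortFolderFiles; infer_instance

-- ===== CLAIM (what is proved, stated in full; the proofs are below) =====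
def Claim_equal_sortFolderFiles : Prop := ∀ (itemsList : List (List (String × String))), Dom_sortFolderFiles itemsList → Pre_sortFolderFiles itemsList → Spec_sortFolderFiles itemsList (sortFolderFiles itemsList)

-- ===== LEMMAS AND PROOFS =====

-- Inserting x (with ∀ y ∈ F, ¬before x y and ∀ t ∈ T, before x t) into F ++ T puts x exactly between F and T.
theorem insertBy_mid {α : Type} (before : α → α → Bool) (x : α) (F T : List α)
    (hF : ∀ y ∈ F, before x y = false) (hT : ∀ t ∈ T, before x t = true) :
    PySem.List.insertBy before x (F ++ T) = F ++ x :: T := by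
  induction F with
  | nil =>
      cases T with
      | nil => rfl
      | cons t ts =>
          simp [PySem.List.insertBy, hT t (by simp)]
  | cons f fs ih =>
      have hf : before x f = false := hF f (by simp)
      simp only [List.cons_append, PySem.List.insertBy, hf]
      simp [ih (fun y hy => hF y (by simp [hy]))]

-- The insertion sort on a Bool key is the stable partition: key-false elements first, then key-true, each in order.
theorem sorted_bool_partition {α : Type} (key : α → Bool) (xs : List α) :
    PySem.List.sorted xs key false
      = xs.filter (fun x => !key x) ++ xs.filter (fun x => key x) := by
  rw [PySem.List.sorted_eq_foldl_insertBy]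
  suffices h : ∀ (ys : List α) (F T : List α), (∀ y ∈ F, key y = false) → (∀ t ∈ T, key t = true) →
      ys.foldl (fun acc x => PySem.List.insertBy (fun a b => decide (key a < key b)) x acc) (F ++ T)
        = (F ++ ys.filter (fun x => !key x)) ++ (T ++ ys.filter (fun x => key x)) by
    simpa using h xs [] [] (by simp) (by simp)
  intro ys
  induction ys with
  | nil => intro F T _ _; simp
  | cons x xs ih =>
      intro F T hF hT
      by_cases hx : key x = true
      · have hins : PySem.List.insertBy (fun a b => decide (key a < key b)) x (F ++ T) = (F ++ T) ++ [x] := by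
          apply PySem.List.insertBy_of_forall_not_before
          intro y hy
          simp only [decide_eq_false_iff_not]
          cases hky : key y <;> simp [hx, Bool.lt_iff]
        have := ih F (T ++ [x]) hF (by intro t ht; rcases List.mem_append.1 ht with h | h
                                       · exact hT t h
                                       · simp at h; simpa [h] using hx)
        simp only [List.foldl_cons, hins, List.append_assoc] at this ⊢
        simp [this, hx]
      · have hx' : key x = false := by simpa using hx
        have hins : PySem.List.insertBy (fun a b => decide (key a < key b)) x (F ++ T) = F ++ x :: T := by
          apply insertBy_mid
          · intro y hy; simp [hx', hF y hy]
          · intro t ht; simp [hx', hT t ht, Bool.lt_iff]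
        have := ih (F ++ [x]) T
          (by intro y hy; rcases List.mem_append.1 hy with h | h
              · exact hF y h
              · simp at h; simpa [h] using hx')
          hT
        simp only [List.foldl_cons, hins] at this ⊢
        have e : F ++ x :: T = (F ++ [x]) ++ T := by simp
        rw [e, this]
        simp [hx']

-- A's partition loop computes those same two filters.
theorem foldA_filter (p : List (String × String) → Bool) (xs : List (List (String × String)))
    (F T : List (List (String × String))) :
    xs.foldl (fun (acc : List (List (String × String)) × List (List (String × String))) x =>
        if p x then (acc.1 ++ [x], acc.2) else (acc.1, acc.2 ++ [x])) (F, T)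
      = (F ++ xs.filter p, T ++ xs.filter (fun x => !p x)) := by
  induction xs generalizing F T with
  | nil => simp
  | cons x xs ih =>
      by_cases hx : p x = true
      · simp [hx, ih]
      · have hx' : p x = false := by simpa using hx
        simp [hx', ih]

-- ===== VERDICT (by name: the statement is the Claim_ definition above) =====
theorem sortFolderFiles_spec : Claim_equal_sortFolderFiles := by
  intro itemsList _ _
  unfold Spec_sortFolderFiles sortFolderFiles sortFolderFiles_alt
  rw [sorted_bool_partition]
  rw [foldA_filter (fun x => pvMime x == "application/vnd.google-apps.folder") itemsList [] []]
  simp only [List.nil_append]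
  congr 1 <;> · apply List.filter_congr; intro x _; simp [bne]
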